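-- pv_equiv track=rewrite | github.com/kiwifruit13/HarnessEngineering | skills/planning-with-files/scripts/generate-report.py | extract_goal
-- ===== SOURCE A (Python) =====
-- def extract_goal(content: str) -> str:
--     """Extract goal from task_plan.md."""
--     if not content:
--         return "Not specified"
--
--     lines = content.split('\n')
--     for i, line in enumerate(lines):
--         if line.startswith('## Goal'):
--             for j in range(i+1, len(lines)):
--                 if lines[j].strip() and not lines[j].startswith('#'):
--                     return lines[j].strip()
--     return "Not specified"
-- ===== SOURCE B (Python) =====
-- def extract_goal(content: str) -> str:
--     """Extract goal from task_plan.md."""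
--     if not content:
--         return "Not specified"
--
--     seen_goal = False
--     for line in content.split('\n'):
--         if line.startswith('## Goal'):
--             seen_goal = True
--         elif seen_goal and line.strip() and not line.startswith('#'):
--             return line.strip()
--     return "Not specified"
-- ===== Notes on version B (the rewrite author's own statement) =====
-- stated objective: simpler
-- what changed: Replaces the nested find-header-then-rescan loops (enumerate plus an inner range scan over indices) with one linear pass over the lines carrying a seen_goal flag.
import Mathlib
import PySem

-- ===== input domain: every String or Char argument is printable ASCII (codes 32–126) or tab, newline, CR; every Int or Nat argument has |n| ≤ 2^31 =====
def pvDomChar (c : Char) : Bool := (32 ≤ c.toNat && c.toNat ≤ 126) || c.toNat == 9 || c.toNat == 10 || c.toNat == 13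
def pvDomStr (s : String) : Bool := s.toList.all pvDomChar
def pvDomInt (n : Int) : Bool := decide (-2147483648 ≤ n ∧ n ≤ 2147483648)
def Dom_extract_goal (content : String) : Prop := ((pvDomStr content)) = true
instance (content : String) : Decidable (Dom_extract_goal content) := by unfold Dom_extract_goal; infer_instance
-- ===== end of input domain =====

-- B replaces A's nested find-header-then-rescan loops with a single pass carrying a seen_goal flag (simpler, same result).

-- ===== PORT A =====
-- inner loop: for j in range(i+1, len(lines)): …
def goalInnerA (lines : List String) (js : List Int) : Option String :=
  match js with
  | [] => none
  | j :: rest =>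
    let lj := PySem.List.pyGetD lines j ""
    if (PySem.Str.strip lj).toList ≠ [] ∧ PySem.Str.startswith lj "#" = false then
      some (PySem.Str.strip lj)
    else goalInnerA lines rest

-- outer loop: for i, line in enumerate(lines): …
def goalOuterA (lines : List String) (pairs : List (Int × String)) : Option String :=
  match pairs with
  | [] => none
  | (i, line) :: rest =>
    if PySem.Str.startswith line "## Goal" = true then
      match goalInnerA lines (PySem.List.pyRange (i + 1) (lines.length : Int) 1) with
      | some r => some r
      | none => goalOuterA lines rest
    else goalOuterA lines rest

def extract_goal (content : String) : String :=
  if content.toList = [] then "Not specified"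
  else
    let lines := (PySem.Str.split? content "\n").getD []
    match goalOuterA lines (PySem.List.enumerate lines 0) with
    | some r => r
    | none => "Not specified"

-- ===== PORT B =====
-- single pass with a seen_goal flag
def goalScanB (ls : List String) (seen : Bool) : Option String :=
  match ls with
  | [] => none
  | l :: rest =>
    if PySem.Str.startswith l "## Goal" = true then goalScanB rest true
    else if seen = true ∧ (PySem.Str.strip l).toList ≠ [] ∧ PySem.Str.startswith l "#" = false then
      some (PySem.Str.strip l)
    else goalScanB rest seen

def extract_goal_alt (content : String) : String :=
  if content.toList = [] then "Not specified"
  else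
    match goalScanB ((PySem.Str.split? content "\n").getD []) false with
    | some r => r
    | none => "Not specified"

-- ===== PRECONDITION & SPEC =====
def Spec_extract_goal (content : String) (out : String) : Prop := out = extract_goal_alt content
instance (content : String) (out : String) : Decidable (Spec_extract_goal content out) := by unfold Spec_extract_goal; infer_instance

-- ===== CLAIM (what is proved, stated in full; the proofs are below) =====
def Claim_equal_extract_goal : Prop := ∀ (content : String), Dom_extract_goal content → Spec_extract_goal content (extract_goal content)

-- ===== LEMMAS AND PROOFS =====

-- proof-side: first "good" line (nonempty strip, not a '#' line), stripped
def findGood (ls : List String) : Option String :=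
  match ls with
  | [] => none
  | l :: rest =>
    if (PySem.Str.strip l).toList ≠ [] ∧ PySem.Str.startswith l "#" = false then
      some (PySem.Str.strip l)
    else findGood rest

lemma header_starts_hash (l : String) (h : PySem.Str.startswith l "## Goal" = true) :
    PySem.Str.startswith l "#" = true := by
  simp only [PySem.Str.startswith_eq] at *
  rw [PySem.Chars.startswith_iff] at *
  exact List.IsPrefix.trans (by decide) h

lemma drop_head (lines : List String) (s : Nat) (l : String) (ls : List String)
    (hd : lines.drop s = l :: ls) : lines[s]? = some l := by
  have h0 : (lines.drop s)[0]? = lines[s + 0]? := List.getElem?_drop ..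
  simpa [hd] using h0.symm

lemma innerA_eq_findGood (tail : List String) :
    ∀ (lines : List String) (s : Nat), lines.drop s = tail →
      goalInnerA lines (PySem.List.pyRange (s : Int) (lines.length : Int) 1) = findGood tail := by
  induction tail with
  | nil =>
    intro lines s hd
    have hs : lines.length ≤ s := by
      by_contra h
      have := List.drop_eq_nil_iff.mp hd
      omega
    rw [PySem.List.pyRange_one_eq_nil (by exact_mod_cast hs)]
    rfl
  | cons l ls ih =>
    intro lines s hd
    have hs : s < lines.length := by
      by_contra h
      rw [List.drop_eq_nil_of_le (by omega)] at hd
      exact (List.cons_ne_nil l ls) hd.symm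
    rw [PySem.List.pyRange_one_cons (by exact_mod_cast hs)]
    have hget : PySem.List.pyGetD lines (s : Int) "" = l := by
      rw [PySem.List.pyGetD_natCast]
      rw [List.getD_eq_getElem?_getD, drop_head lines s l ls hd]
      rfl
    have hd' : lines.drop (s + 1) = ls := by
      rw [← List.tail_drop, hd]
      rfl
    have hrec := ih lines (s + 1) hd'
    push_cast at hrec
    simp only [goalInnerA, findGood, hget, hrec]

-- A after a failed header: no good line remains, so the rest of the outer loop returns none
lemma outerA_none (rest : List String) :
    ∀ (lines : List String) (s : Nat), lines.drop s = rest → findGood rest = none →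
      goalOuterA lines (PySem.List.enumerate rest (s : Int)) = none := by
  induction rest with
  | nil => intro lines s _ _; rfl
  | cons l ls ih =>
    intro lines s hd hfg
    have hd' : lines.drop (s + 1) = ls := by
      rw [← List.tail_drop, hd]
      rfl
    have hnotgood : ¬ ((PySem.Str.strip l).toList ≠ [] ∧ PySem.Str.startswith l "#" = false) := by
      intro h
      unfold findGood at hfg
      rw [if_pos h] at hfg
      exact (Option.some_ne_none _) hfg
    have hfg' : findGood ls = none := by
      unfold findGood at hfg
      rwa [if_neg hnotgood] at hfg
    have hinner := innerA_eq_findGood ls lines (s + 1) hd'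
    have hrec := ih lines (s + 1) hd' hfg'
    push_cast at hinner hrec
    rw [PySem.List.enumerate_cons]
    simp only [goalOuterA, hinner, hfg', hrec]
    split <;> rfl

lemma scanB_true_eq_findGood (ls : List String) : goalScanB ls true = findGood ls := by
  induction ls with
  | nil => rfl
  | cons l rest ih =>
    by_cases hh : PySem.Str.startswith l "## Goal" = true
    · have h1 := header_starts_hash l hh
      have hng : ¬ ((PySem.Str.strip l).toList ≠ [] ∧ PySem.Str.startswith l "#" = false) := by
        intro h
        rw [h.2] at h1
        exact Bool.noConfusion h1
      simp only [goalScanB, findGood, hh, if_true, if_neg hng, ih]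
    · simp only [goalScanB, findGood, hh, ih]
      split_ifs with h2 h3 <;> simp_all

lemma outerA_eq_scanB (rest : List String) :
    ∀ (lines : List String) (s : Nat), lines.drop s = rest →
      goalOuterA lines (PySem.List.enumerate rest (s : Int)) = goalScanB rest false := by
  induction rest with
  | nil => intro lines s _; rfl
  | cons l ls ih =>
    intro lines s hd
    have hd' : lines.drop (s + 1) = ls := by
      rw [← List.tail_drop, hd]
      rfl
    rw [PySem.List.enumerate_cons]
    by_cases hh : PySem.Str.startswith l "## Goal" = true
    · have hinner := innerA_eq_findGood ls lines (s + 1) hd'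
      push_cast at hinner
      simp only [goalOuterA, goalScanB, hh, if_true, hinner, scanB_true_eq_findGood]
      cases hfg : findGood ls with
      | some r => rfl
      | none =>
        have := outerA_none ls lines (s + 1) hd' hfg
        push_cast at this
        simpa using this
    · have hrec := ih lines (s + 1) hd'
      push_cast at hrec
      simp only [goalOuterA, goalScanB, hh, hrec]
      simp

-- ===== VERDICT (by name: the statement is the Claim_ definition above) =====
theorem extract_goal_spec : Claim_equal_extract_goal := by
  intro content _
  unfold Spec_extract_goal extract_goal extract_goal_alt
  by_cases h : content.toList = []
  · simp [h]
  · simp only [h, if_false]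
    have key := outerA_eq_scanB ((PySem.Str.split? content "\n").getD [])
      ((PySem.Str.split? content "\n").getD []) 0 (by simp)
    push_cast at key
    rw [key]
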